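-- pv_equiv track=rewrite | github.com/programelot/foobar-answer | Expanding Nebula.py | solution
-- ===== SOURCE A (Python) =====
-- def next(lst):
--     l = len(lst)
--     for i in range(l):
--         if not lst[i]:
--             return [False] * i + [True] + [lst[j] for j in range(i + 1, l)]
--     return None
--
-- def solution(g):
--     h = len(g)
--     w = len(g[0])
--
--     #Last line
--     possiblePast = dict()#(state, number of cases)
--     line = [False] * (h + 1)
--     while line != None:
--         match = True
--         for i in range(h):
--             if g[i][w - 1] and line[i] and line[i + 1]:
--                 match = False
--                 break
--         if match: #possible
--             tl = tuple([e for e in line])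
--             possiblePast[tl] = 1
--         line = next(line)
--
--     x = w - 1
--     while x >= 0:
--         currentCount = dict()
--         for p in possiblePast:
--             pl = p #possible line
--             pc = possiblePast[p] #possible count
--             line = [False] * (h + 1)
--             while line != None:
--                 match = True
--                 for i in range(h):
--                     s = sum([line[i], line[i + 1], pl[i], pl[i + 1]])
--                     if not((s == 1 and g[i][x]) or (s != 1 and not g[i][x])):
--                         match = False
--                         break
--                 if match: #possible
--                     tl = tuple([e for e in line])
--                     if tl in currentCount:
--                         currentCount[tl] += pc
--                     else:
--                         currentCount[tl] = pc
--                 line = next(line)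
--         possiblePast = currentCount
--         x -= 1
--     s = 0
--     for k in currentCount:
--         s += currentCount[k]
--     return s
-- ===== SOURCE B (Python) =====
-- def solution(g):
--     h = len(g)
--     w = len(g[0])
--
--     # all bit-lines of length h+1, in binary-counter order (bit 0 fastest)
--     lines = [()]
--     for _ in range(h + 1):
--         lines = [(b,) + t for t in lines for b in (False, True)]
--
--     # one column of g as a tuple
--     def column(x):
--         return tuple(g[i][x] for i in range(h))
--
--     # transition table, built once: (produced column, right line) -> lines to its left
--     trans = {}
--     for p in lines:
--         for l in lines:
--             c = tuple(l[i] + l[i + 1] + p[i] + p[i + 1] == 1 for i in range(h))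
--             trans.setdefault((c, p), []).append(l)
--
--     # DP right-to-left: counts[line] = ways to fill everything to the right
--     counts = {p: 1 for p in lines}
--     for x in range(w - 1, -1, -1):
--         c = column(x)
--         new = {}
--         for p, v in counts.items():
--             for l in trans.get((c, p), ()):
--                 new[l] = new.get(l, 0) + v
--         counts = new
--     return sum(counts.values())
-- ===== Notes on version B (the rewrite author's own statement) =====
-- stated objective: alternative
-- what changed: B precomputes a transition table (produced column, right line) -> compatible left lines once, generates the 2^(h+1) candidate lines by list doubling instead of A's binary-counter 'next', starts the DP from uniform counts instead of A's pre-filtered last column, and updates the count dictionary per grid column by table lookup instead of A's per-column re-enumeration of all lines with an O(h) compatibility scan per pair.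
import Mathlib
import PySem

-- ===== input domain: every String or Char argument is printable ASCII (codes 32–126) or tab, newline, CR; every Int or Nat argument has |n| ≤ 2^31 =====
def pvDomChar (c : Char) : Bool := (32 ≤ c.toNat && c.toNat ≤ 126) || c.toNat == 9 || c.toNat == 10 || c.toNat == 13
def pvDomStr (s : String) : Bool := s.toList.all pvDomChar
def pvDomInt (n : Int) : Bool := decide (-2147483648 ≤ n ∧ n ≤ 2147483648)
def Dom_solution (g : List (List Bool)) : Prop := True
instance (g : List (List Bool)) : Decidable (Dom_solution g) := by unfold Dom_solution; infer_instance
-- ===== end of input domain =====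

-- B precomputes a transition table (produced column, right line) -> compatible left lines
-- once and runs the per-column DP by table lookup, instead of A's re-enumeration of all
-- 2^(h+1) lines with a per-pair compatibility scan for every column (alternative algorithm).

-- ===== PORT A =====

-- Python `next`: first False becomes True, everything before it becomes False, rest unchanged
def pvNextA : List Bool → Option (List Bool)
  | [] => none
  | b :: bs => if b then (pvNextA bs).map (fun r => false :: r) else some (true :: bs)

-- the `while line != None` loop; the fuel (2^(h+1) at every call site) only makes it total
def pvLinesLoop {σ : Type} (f : σ → List Bool → σ) : Nat → Option (List Bool) → σ → σ
  | 0, _, s => s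
  | _ + 1, none, s => s
  | fuel + 1, some line, s => pvLinesLoop f fuel (pvNextA line) (f s line)

-- the `for i in range(h): if g[i][w-1] and line[i] and line[i+1]` filter (with break)
def pvMatch1 (g : List (List Bool)) (h w : Nat) (line : List Bool) : Bool :=
  (List.range h).all fun i =>
    !((g.getD i []).getD (w - 1) false && line.getD i false && line.getD (i + 1) false)

-- the full per-cell compatibility check of the main loop
def pvMatch2 (g : List (List Bool)) (h x : Nat) (pl line : List Bool) : Bool :=
  (List.range h).all fun i =>
    let s := (line.getD i false).toNat + (line.getD (i + 1) false).toNat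
             + (pl.getD i false).toNat + (pl.getD (i + 1) false).toNat
    ((s == 1) && (g.getD i []).getD x false) || (!(s == 1) && !((g.getD i []).getD x false))

def solution (g : List (List Bool)) : Int :=
  let h := g.length
  let w := (g.headD []).length
  let init : PySem.Dict (List Bool) Int :=
    pvLinesLoop (fun d line => if pvMatch1 g h w line then d.insert line 1 else d)
      (2 ^ (h + 1)) (some (List.replicate (h + 1) false)) PySem.Dict.empty
  let final : PySem.Dict (List Bool) Int :=
    (List.range w).reverse.foldl (fun past x =>
      past.items.foldl (fun cur (pv : List Bool × Int) =>
        pvLinesLoop (fun cur line =>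
          if pvMatch2 g h x pv.1 line then
            match cur.get? line with
            | some c => cur.insert line (c + pv.2)
            | none => cur.insert line pv.2
          else cur) (2 ^ (h + 1)) (some (List.replicate (h + 1) false)) cur)
        PySem.Dict.empty) init
  final.values.foldl (· + ·) 0

-- ===== PORT B =====

-- all bit-lines of length L, built by doubling (`lines = [(b,)+t for t in lines for b in …]`)
def pvLinesB (L : Nat) : List (List Bool) :=
  (List.range L).foldl (fun ls _ => ls.flatMap (fun t => [false :: t, true :: t])) [[]]

-- `column(x)`
def pvColB (g : List (List Bool)) (h x : Nat) : List Bool :=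
  (List.range h).map fun i => (g.getD i []).getD x false

-- the column pattern produced by the pair (p, l)
def pvProd (h : Nat) (p l : List Bool) : List Bool :=
  (List.range h).map fun i =>
    decide ((l.getD i false).toNat + (l.getD (i + 1) false).toNat
            + (p.getD i false).toNat + (p.getD (i + 1) false).toNat = 1)

-- transition table: (produced column, right line) -> left lines, via setdefault/append
def pvTrans (h : Nat) (lines : List (List Bool)) :
    PySem.Dict (List Bool × List Bool) (List (List Bool)) :=
  lines.foldl (fun t p => lines.foldl (fun t l =>
      let c := pvProd h p l
      t.insert (c, p) (t.getD (c, p) [] ++ [l])) t) PySem.Dict.empty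

def solution_alt (g : List (List Bool)) : Int :=
  let h := g.length
  let w := (g.headD []).length
  let lines := pvLinesB (h + 1)
  let trans := pvTrans h lines
  let counts0 : PySem.Dict (List Bool) Int :=
    lines.foldl (fun d p => d.insert p 1) PySem.Dict.empty
  let final := (List.range w).reverse.foldl (fun counts x =>
      counts.items.foldl (fun nw (pv : List Bool × Int) =>
        (trans.getD (pvColB g h x, pv.1) []).foldl
          (fun nw l => nw.insert l (nw.getD l 0 + pv.2)) nw)
        PySem.Dict.empty) counts0
  final.values.sum

-- ===== PRECONDITION & SPEC =====
-- Pre_ excludes exactly the inputs where A raises: empty g (IndexError on g[0]), a zero-width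
-- first row (w = 0: NameError/negative indexing), or a later row shorter than g[0] (IndexError).
def Pre_solution (g : List (List Bool)) : Prop :=
  g ≠ [] ∧ 0 < (g.headD []).length ∧ ∀ r ∈ g, (g.headD []).length ≤ r.length
instance (g : List (List Bool)) : Decidable (Pre_solution g) := by
  unfold Pre_solution; infer_instance
def pvWitness_solution : List (List Bool) := [[true]]
def Spec_solution (g : List (List Bool)) (out : Int) : Prop := out = solution_alt g
instance (g : List (List Bool)) (out : Int) : Decidable (Spec_solution g out) := by
  unfold Spec_solution; infer_instance

-- ===== CLAIM (what is proved, stated in full; the proofs are below) =====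
def Claim_equal_solution : Prop :=
  ∀ (g : List (List Bool)), Dom_solution g → Pre_solution g → Spec_solution g (solution g)


-- ===== LEMMAS AND PROOFS =====

-- the sequence of lines the while-loop visits
def pvEnum : Nat → Option (List Bool) → List (List Bool)
  | 0, _ => []
  | _ + 1, none => []
  | fuel + 1, some l => l :: pvEnum fuel (pvNextA l)

theorem pvLinesLoop_eq_foldl {σ : Type} (f : σ → List Bool → σ) :
    ∀ (fuel : Nat) (ol : Option (List Bool)) (s : σ),
      pvLinesLoop f fuel ol s = (pvEnum fuel ol).foldl f s := by
  intro fuel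
  induction fuel with
  | zero => intro ol s; cases ol <;> rfl
  | succ n ih => intro ol s; cases ol <;> simp [pvLinesLoop, pvEnum, ih]

theorem pvEnum_double : ∀ (f : Nat) (t : List Bool),
    pvEnum (2 * f) (some (false :: t))
      = (pvEnum f (some t)).flatMap (fun u => [false :: u, true :: u]) := by
  intro f
  induction f with
  | zero => intro t; rfl
  | succ n ih =>
    intro t
    have h2 : 2 * (n + 1) = (2 * n + 1) + 1 := by ring
    rw [h2]
    show (false :: t) :: pvEnum (2 * n + 1) (pvNextA (false :: t)) = _
    have hnx : pvNextA (false :: t) = some (true :: t) := by simp [pvNextA]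
    rw [hnx]
    show (false :: t) :: (true :: t) ::
        pvEnum (2 * n) ((pvNextA t).map (fun r => false :: r)) = _
    cases hn : pvNextA t with
    | none =>
      simp only [Option.map_none]
      cases n with
      | zero => rfl
      | succ m =>
        show (false :: t) :: (true :: t) :: pvEnum (2 * (m + 1)) none = _
        have hm : (2 : Nat) * (m + 1) = (2 * m + 1) + 1 := by ring
        rw [hm]
        simp [pvEnum, hn]
    | some t' =>
      simp only [Option.map_some]
      rw [ih t']
      simp [pvEnum, hn]

theorem pvLinesB_succ (L : Nat) :
    pvLinesB (L + 1) = (pvLinesB L).flatMap (fun t => [false :: t, true :: t]) := by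
  simp [pvLinesB, List.range_succ]

theorem pvEnum_eq_linesB : ∀ L : Nat,
    pvEnum (2 ^ L) (some (List.replicate L false)) = pvLinesB L := by
  intro L
  induction L with
  | zero => rfl
  | succ n ih =>
    have h2 : (2 : Nat) ^ (n + 1) = 2 * 2 ^ n := by ring
    rw [h2, List.replicate_succ, pvEnum_double, ih, pvLinesB_succ]

theorem pvLinesB_nodup (L : Nat) : (pvLinesB L).Nodup := by
  induction L with
  | zero => simp [pvLinesB]
  | succ n ih =>
    rw [pvLinesB_succ, List.nodup_flatMap]
    refine ⟨fun a _ => by simp, ih.imp ?_⟩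
    intro a b hab x hx hx2
    simp only [List.mem_cons, List.not_mem_nil, or_false] at hx hx2
    rcases hx with h1 | h1 <;> rcases hx2 with h2 | h2 <;> subst h1 <;> simp_all

-- A's inner insert (if-in-then-add-else-set) is B's single insert
theorem pvInsertAdd_eq (cur : PySem.Dict (List Bool) Int) (l : List Bool) (v : Int) :
    (match cur.get? l with
     | some c => cur.insert l (c + v)
     | none => cur.insert l v) = cur.insert l (cur.getD l 0 + v) := by
  cases hc : cur.get? l with
  | some c => simp [PySem.Dict.getD_eq_get?_getD, hc]
  | none => simp [PySem.Dict.getD_eq_get?_getD, hc]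

-- A's full match test is "produced column = grid column"
theorem pvMatch2_eq (g : List (List Bool)) (h x : Nat) (p l : List Bool) :
    pvMatch2 g h x p l = (pvProd h p l == pvColB g h x) := by
  rw [Bool.eq_iff_iff]
  simp only [pvMatch2, pvProd, pvColB, List.all_eq_true, beq_iff_eq, List.map_inj_left]
  refine forall_congr' fun i => imp_congr_right fun _ => ?_
  cases hg : (g.getD i []).getD x false <;>
    by_cases h1 : ((l.getD i false).toNat + (l.getD (i + 1) false).toNat
        + (p.getD i false).toNat + (p.getD (i + 1) false).toNat) = 1 <;>
    simp [h1]

-- one inner pass of the table-building loop, for a fixed right line p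
theorem pvInnerTrans_getD (h : Nat) (p : List Bool) (X : List (List Bool))
    (t : PySem.Dict (List Bool × List Bool) (List (List Bool))) (c q : List Bool) :
    (X.foldl (fun t l =>
        t.insert (pvProd h p l, p) (t.getD (pvProd h p l, p) [] ++ [l])) t).getD (c, q) []
      = t.getD (c, q) [] ++ (if p = q then X.filter (fun l => pvProd h p l == c) else []) := by
  have hmod : (fun (t : PySem.Dict (List Bool × List Bool) (List (List Bool))) l =>
      t.insert (pvProd h p l, p) (t.getD (pvProd h p l, p) [] ++ [l]))
      = fun t l => t.modify (pvProd h p l, p) [] (fun v => v ++ [l]) := rfl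
  rw [hmod]
  have hmap : X.foldl (fun t l => t.modify (pvProd h p l, p) [] (fun v => v ++ [l])) t
      = (X.map (fun l => ((pvProd h p l, p), l))).foldl
          (fun d pr => d.modify pr.1 [] (fun v => v ++ [pr.2])) t := by
    rw [List.foldl_map]
  rw [hmap, PySem.Dict.getD_foldl_modify_append]
  congr 1
  rw [List.filter_map, List.map_map]
  by_cases hpq : p = q
  · subst hpq
    rw [if_pos rfl]
    have : ∀ l ∈ X, ((fun l => decide ((pvProd h p l, p) = (c, p))) l
        = (fun l => pvProd h p l == c) l) := by
      intro l _
      rw [Bool.eq_iff_iff]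
      simp [Prod.ext_iff]
    rw [show ((fun pr => pr.1 == (c, p)) ∘ fun l => ((pvProd h p l, p), l))
        = fun l => decide ((pvProd h p l, p) = (c, p)) from by
      funext l
      show ((pvProd h p l, p) == (c, p)) = decide ((pvProd h p l, p) = (c, p))
      rw [Bool.eq_iff_iff]
      simp]
    rw [List.filter_congr this]
    exact List.map_id _
  · rw [if_neg hpq]
    have : ∀ l ∈ X, ¬(((fun pr => pr.1 == (c, q)) ∘ fun l => ((pvProd h p l, p), l)) l = true) := by
      intro l _
      simp [Function.comp, Prod.ext_iff, hpq]
    rw [List.filter_eq_nil_iff.mpr this]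
    simp

theorem pvOuterTrans_getD (h : Nat) (lines : List (List Bool)) :
    ∀ (P : List (List Bool)), P.Nodup →
    ∀ (t : PySem.Dict (List Bool × List Bool) (List (List Bool))) (c q : List Bool),
    (P.foldl (fun t p => lines.foldl (fun t l =>
        t.insert (pvProd h p l, p) (t.getD (pvProd h p l, p) [] ++ [l])) t) t).getD (c, q) []
      = t.getD (c, q) []
        ++ (if q ∈ P then lines.filter (fun l => pvProd h q l == c) else []) := by
  intro P
  induction P with
  | nil => intro _ t c q; simp
  | cons p P' ih =>
    intro hnd t c q
    simp only [List.foldl_cons]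
    rw [ih hnd.of_cons, pvInnerTrans_getD]
    by_cases hpq : p = q
    · subst hpq
      have hnp : p ∉ P' := (List.nodup_cons.mp hnd).1
      simp [hnp]
    · simp [hpq, Ne.symm hpq, List.mem_cons]

theorem pvTrans_getD (h : Nat) (lines : List (List Bool)) (hnd : lines.Nodup)
    (c q : List Bool) (hq : q ∈ lines) :
    (pvTrans h lines).getD (c, q) [] = lines.filter (fun l => pvProd h q l == c) := by
  show ((lines.foldl (fun t p => lines.foldl (fun t l =>
      t.insert (pvProd h p l, p) (t.getD (pvProd h p l, p) [] ++ [l])) t)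
      PySem.Dict.empty)).getD (c, q) [] = _
  rw [pvOuterTrans_getD h lines lines hnd, PySem.Dict.getD_empty]
  simp [hq]

theorem pvTrans_getD_not_mem (h : Nat) (lines : List (List Bool)) (hnd : lines.Nodup)
    (c q : List Bool) (hq : q ∉ lines) :
    (pvTrans h lines).getD (c, q) [] = [] := by
  show ((lines.foldl (fun t p => lines.foldl (fun t l =>
      t.insert (pvProd h p l, p) (t.getD (pvProd h p l, p) [] ++ [l])) t)
      PySem.Dict.empty)).getD (c, q) [] = _
  rw [pvOuterTrans_getD h lines lines hnd, PySem.Dict.getD_empty]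
  simp [hq]

-- the per-column step of A's main loop
def pvStepA (g : List (List Bool)) (h : Nat)
    (past : PySem.Dict (List Bool) Int) (x : Nat) : PySem.Dict (List Bool) Int :=
  past.items.foldl (fun cur (pv : List Bool × Int) =>
    pvLinesLoop (fun cur line =>
      if pvMatch2 g h x pv.1 line then
        match cur.get? line with
        | some c => cur.insert line (c + pv.2)
        | none => cur.insert line pv.2
      else cur) (2 ^ (h + 1)) (some (List.replicate (h + 1) false)) cur)
    PySem.Dict.empty

-- the per-column step of B's main loop
def pvStepB (g : List (List Bool)) (h : Nat)
    (counts : PySem.Dict (List Bool) Int) (x : Nat) : PySem.Dict (List Bool) Int :=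
  counts.items.foldl (fun nw (pv : List Bool × Int) =>
    ((pvTrans h (pvLinesB (h + 1))).getD (pvColB g h x, pv.1) []).foldl
      (fun nw l => nw.insert l (nw.getD l 0 + pv.2)) nw)
    PySem.Dict.empty

theorem pvStep_eq (g : List (List Bool)) (h x : Nat) (past : PySem.Dict (List Bool) Int)
    (hk : ∀ k ∈ past.keys, k ∈ pvLinesB (h + 1)) :
    pvStepA g h past x = pvStepB g h past x := by
  unfold pvStepA pvStepB
  apply PySem.List.foldl_congr_mem
  intro cur pv hpv
  have hp1 : pv.1 ∈ pvLinesB (h + 1) := by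
    apply hk
    simp only [PySem.Dict.keys]
    exact List.mem_map_of_mem hpv
  rw [pvLinesLoop_eq_foldl, pvEnum_eq_linesB,
      pvTrans_getD h _ (pvLinesB_nodup _) _ _ hp1, List.foldl_filter]
  apply PySem.List.foldl_congr_mem
  intro acc l _
  rw [pvMatch2_eq]
  by_cases hc : (pvProd h pv.1 l == pvColB g h x) = true
  · rw [if_pos hc, if_pos hc, pvInsertAdd_eq]
  · rw [if_neg hc, if_neg hc]

theorem pvInsFold_keys (Q : List Bool → Prop) :
    ∀ (X : List (List Bool)) (v : Int) (nw : PySem.Dict (List Bool) Int),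
    (∀ k ∈ nw.keys, Q k) → (∀ l ∈ X, Q l) →
    ∀ k ∈ (X.foldl (fun nw l => nw.insert l (nw.getD l 0 + v)) nw).keys, Q k := by
  intro X
  induction X with
  | nil => intro v nw hnw _ k hk; exact hnw k hk
  | cons l X' ih =>
    intro v nw hnw hX k hk
    refine ih v _ ?_ (fun l' hl' => hX l' (List.mem_cons_of_mem _ hl')) k hk
    intro k' hk'
    rcases (PySem.Dict.mem_keys_insert _ _ _ _).mp hk' with h1 | h1
    · exact h1 ▸ hX l (List.mem_cons_self ..)
    · exact hnw k' h1

theorem pvStepB_keys (g : List (List Bool)) (h x : Nat) (d : PySem.Dict (List Bool) Int) :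
    ∀ k ∈ (pvStepB g h d x).keys, k ∈ pvLinesB (h + 1) := by
  unfold pvStepB
  have aux : ∀ (its : List (List Bool × Int)) (nw : PySem.Dict (List Bool) Int),
      (∀ k ∈ nw.keys, k ∈ pvLinesB (h + 1)) →
      ∀ k ∈ (its.foldl (fun nw (pv : List Bool × Int) =>
          ((pvTrans h (pvLinesB (h + 1))).getD (pvColB g h x, pv.1) []).foldl
            (fun nw l => nw.insert l (nw.getD l 0 + pv.2)) nw) nw).keys,
        k ∈ pvLinesB (h + 1) := by
    intro its
    induction its with
    | nil => intro nw hnw k hk; exact hnw k hk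
    | cons pv its' ih =>
      intro nw hnw k hk
      refine ih _ ?_ k hk
      apply pvInsFold_keys _ _ _ _ hnw
      intro l hl
      by_cases hp : pv.1 ∈ pvLinesB (h + 1)
      · rw [pvTrans_getD h _ (pvLinesB_nodup _) _ _ hp] at hl
        exact (List.mem_filter.mp hl).1
      · rw [pvTrans_getD_not_mem h _ (pvLinesB_nodup _) _ _ hp] at hl
        exact absurd hl (List.not_mem_nil)
  intro k hk
  exact aux d.items PySem.Dict.empty (by simp [PySem.Dict.keys_empty]) k hk

theorem pvFold_eq (g : List (List Bool)) (h : Nat) :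
    ∀ (xs : List Nat) (d : PySem.Dict (List Bool) Int),
    (∀ k ∈ d.keys, k ∈ pvLinesB (h + 1)) →
    xs.foldl (pvStepA g h) d = xs.foldl (pvStepB g h) d := by
  intro xs
  induction xs with
  | nil => intro d _; rfl
  | cons x xs' ih =>
    intro d hd
    simp only [List.foldl_cons]
    rw [pvStep_eq g h x d hd]
    exact ih _ (pvStepB_keys g h x d)

-- items of A's initial dictionary: the filtered lines, each with count 1
theorem pvInitA_items (g : List (List Bool)) (h w : Nat) :
    (pvLinesLoop (fun d line => if pvMatch1 g h w line then d.insert line 1 else d)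
        (2 ^ (h + 1)) (some (List.replicate (h + 1) false)) PySem.Dict.empty).items
      = ((pvLinesB (h + 1)).filter (pvMatch1 g h w)).map (fun p => (p, (1 : Int))) := by
  rw [pvLinesLoop_eq_foldl, pvEnum_eq_linesB, ← List.foldl_filter]
  rw [PySem.Dict.items_foldl_insert_fresh _ (fun a => a) (fun _ => (1 : Int))]
  · simp [show (PySem.Dict.empty : PySem.Dict (List Bool) Int).items = [] from rfl]
  · intro a _; exact PySem.Dict.contains_empty _
  · simpa using ((pvLinesB_nodup (h + 1)).filter _)

-- items of B's initial dictionary: all lines, each with count 1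
theorem pvCounts0_items (h : Nat) :
    ((pvLinesB (h + 1)).foldl (fun d p => d.insert p 1) PySem.Dict.empty).items
      = (pvLinesB (h + 1)).map (fun p => (p, (1 : Int))) := by
  rw [PySem.Dict.items_foldl_insert_fresh _ (fun a => a) (fun _ => (1 : Int))]
  · simp [show (PySem.Dict.empty : PySem.Dict (List Bool) Int).items = [] from rfl]
  · intro a _; exact PySem.Dict.contains_empty _
  · simpa using pvLinesB_nodup (h + 1)

-- a line failing A's last-column pre-filter has no compatible left line at column w-1
theorem pvNoMatch1 (g : List (List Bool)) (h w : Nat) (p : List Bool)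
    (hp : p ∈ pvLinesB (h + 1)) (hm : ¬ pvMatch1 g h w p = true) :
    (pvTrans h (pvLinesB (h + 1))).getD (pvColB g h (w - 1), p) [] = [] := by
  rw [pvTrans_getD h _ (pvLinesB_nodup _) _ _ hp]
  rw [List.filter_eq_nil_iff]
  intro l _
  simp only [pvMatch1, List.all_eq_true] at hm
  push_neg at hm
  obtain ⟨i, hi, hcond⟩ := hm
  have hcond' : ((g.getD i []).getD (w - 1) false && p.getD i false
      && p.getD (i + 1) false) = true := by
    revert hcond
    cases ((g.getD i []).getD (w - 1) false && p.getD i false && p.getD (i + 1) false) <;> simp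
  rw [Bool.and_eq_true, Bool.and_eq_true] at hcond'
  obtain ⟨⟨hg1, hp1⟩, hp2⟩ := hcond'
  intro hbe
  rw [beq_iff_eq, pvProd, pvColB] at hbe
  have hpt := List.map_inj_left.mp hbe i hi
  rw [hg1, hp1, hp2] at hpt
  simp only [Bool.toNat_true, decide_eq_true_eq] at hpt
  omega

-- ===== VERDICT (by name: the statement is the Claim_ definition above) =====
theorem solution_spec : Claim_equal_solution := by
  unfold Claim_equal_solution
  intro g _ hpre
  obtain ⟨-, hw, -⟩ := hpre
  unfold Spec_solution
  obtain ⟨k, hk⟩ : ∃ k, (g.headD []).length = k + 1 := ⟨(g.headD []).length - 1, by omega⟩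
  rw [show solution g = ((List.range (g.headD []).length).reverse.foldl
        (pvStepA g g.length)
        (pvLinesLoop (fun d line => if pvMatch1 g g.length (g.headD []).length line
            then d.insert line 1 else d)
          (2 ^ (g.length + 1)) (some (List.replicate (g.length + 1) false))
          PySem.Dict.empty)).values.foldl (· + ·) 0 from rfl]
  rw [show solution_alt g = ((List.range (g.headD []).length).reverse.foldl
        (pvStepB g g.length)
        ((pvLinesB (g.length + 1)).foldl (fun d p => d.insert p 1)
          PySem.Dict.empty)).values.sum from rfl]
  rw [hk]
  rw [show (List.range (k + 1)).reverse = k :: (List.range k).reverse by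
    rw [List.range_succ, List.reverse_append]; rfl]
  simp only [List.foldl_cons]
  have hinitkeys : ∀ kk ∈ (pvLinesLoop
      (fun d line => if pvMatch1 g g.length (k + 1) line then d.insert line (1 : Int) else d)
      (2 ^ (g.length + 1)) (some (List.replicate (g.length + 1) false))
      (PySem.Dict.empty : PySem.Dict (List Bool) Int)).keys,
      kk ∈ pvLinesB (g.length + 1) := by
    intro kk hkk
    simp only [PySem.Dict.keys, pvInitA_items, List.mem_map] at hkk
    obtain ⟨p, ⟨a, ha, rfl⟩, rfl⟩ := hkk
    exact (List.mem_filter.mp ha).1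
  have hfirst : pvStepA g g.length (pvLinesLoop
        (fun d line => if pvMatch1 g g.length (k + 1) line then d.insert line 1 else d)
        (2 ^ (g.length + 1)) (some (List.replicate (g.length + 1) false))
        PySem.Dict.empty) k
      = pvStepB g g.length
        ((pvLinesB (g.length + 1)).foldl (fun d p => d.insert p 1) PySem.Dict.empty) k := by
    rw [pvStep_eq g g.length k _ hinitkeys]
    unfold pvStepB
    rw [pvInitA_items, pvCounts0_items, List.foldl_map, List.foldl_map, List.foldl_filter]
    apply PySem.List.foldl_congr_mem
    intro acc p hp
    by_cases hm : pvMatch1 g g.length (k + 1) p = true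
    · rw [if_pos hm]
    · rw [if_neg hm]
      have hz := pvNoMatch1 g g.length (k + 1) p hp hm
      rw [Nat.add_sub_cancel] at hz
      rw [hz]
      rfl
  rw [hfirst, pvFold_eq g g.length _ _ (pvStepB_keys g g.length k _), List.sum_eq_foldl]
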